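-- pv_equiv track=rewrite | github.com/CERI-KRISP/seqPatcher | seqpatcher.py | useful_range
-- ===== SOURCE A (Python) =====
-- def ranges(lst, given_gap=0):
--     """
--     A generator returns list of range based on given numbers
--     [1,2,3,4,5, 10, 11, 12, 13, 14] => [[1,5], [10,14]]
--     """
--     lst_sorted = sorted(lst)
--     init = 0
--     for num in range(1, len(lst_sorted)):
--         # reported_gap = lst_sorted[num] - lst_sorted[num - 1] - 1
--         if lst_sorted[num] > given_gap + 1 + lst_sorted[num - 1]:
--             # or (reported_gap % 3 != 0):
--             # gap=0 means overlapping
--             yield (lst_sorted[init], lst_sorted[num - 1])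
--             init = num
--     yield (lst_sorted[init], lst_sorted[-1])
--
-- def useful_range(lst, gap=10):  # TODO: Add in command
--     """Returns first occurance maximum length block range."""
--     # TODO: Check with other that if they are happy with it
--     # or they want other fragment to be selected
--
--     trange = list(ranges(lst, gap))
--     pre_frag_len = 0
--     myrange = trange[0]
--     for rng in trange:
--         frag_len = rng[1] - rng[0] + 1
--         if pre_frag_len < frag_len:
--             pre_frag_len = frag_len
--             myrange = rng
--     return myrange
-- ===== SOURCE B (Python) =====
-- def useful_range(lst, gap=10):
--     """Returns first occurance maximum length block range."""
--     s = sorted(lst)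
--     start = s[0]
--     best_len = 0
--     best = (start, start)
--     for i in range(1, len(s)):
--         if s[i] > gap + 1 + s[i - 1]:
--             cur_len = s[i - 1] - start + 1
--             if best_len < cur_len:
--                 best_len = cur_len
--                 best = (start, s[i - 1])
--             start = s[i]
--     cur_len = s[-1] - start + 1
--     if best_len < cur_len:
--         best = (start, s[-1])
--     return best
-- ===== Notes on version B (the rewrite author's own statement) =====
-- stated objective: alternative
-- what changed: B fuses A's two phases (materialising the full block list via a generator, then a second scan for the first maximum) into one single pass over the sorted list that tracks the current block's start and the best block seen so far; no intermediate list is built.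
-- outside the precondition, e.g. on useful_range([], 10): A raises IndexError, B raises IndexError
import Mathlib
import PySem

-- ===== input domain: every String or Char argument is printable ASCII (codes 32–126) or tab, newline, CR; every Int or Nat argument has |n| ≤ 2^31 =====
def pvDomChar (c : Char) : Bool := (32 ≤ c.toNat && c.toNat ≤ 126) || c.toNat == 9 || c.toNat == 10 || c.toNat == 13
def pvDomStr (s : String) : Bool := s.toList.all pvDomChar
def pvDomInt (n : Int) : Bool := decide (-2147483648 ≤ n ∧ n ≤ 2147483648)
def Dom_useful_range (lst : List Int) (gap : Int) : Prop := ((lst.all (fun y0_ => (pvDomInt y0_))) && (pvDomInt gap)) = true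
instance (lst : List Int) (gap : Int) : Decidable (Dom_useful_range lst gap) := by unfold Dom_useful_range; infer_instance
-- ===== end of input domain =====

-- B fuses A's two passes (build block list, then scan for first maximum) into one pass over the sorted list; both raise IndexError on [] (excluded by Pre_).


-- ===== PORT A =====
-- helper 'ranges' of A: generator materialised as the list of yielded pairs
def ranges_py (lst : List Int) (given_gap : Int) : List (Int × Int) :=
  let lst_sorted := PySem.List.sorted lst (fun x => x) false
  let st := (PySem.List.pyRange 1 (lst_sorted.length : Int) 1).foldl
    (fun (st : Int × List (Int × Int)) num =>
      if PySem.List.pyGetD lst_sorted num 0 > given_gap + 1 + PySem.List.pyGetD lst_sorted (num - 1) 0 then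
        (num, st.2 ++ [(PySem.List.pyGetD lst_sorted st.1 0, PySem.List.pyGetD lst_sorted (num - 1) 0)])
      else st)
    (0, [])
  st.2 ++ [(PySem.List.pyGetD lst_sorted st.1 0, PySem.List.pyGetD lst_sorted (-1) 0)]

def useful_range (lst : List Int) (gap : Int) : Int × Int :=
  let trange := ranges_py lst gap
  let st := trange.foldl
    (fun (st : Int × (Int × Int)) rng =>
      if st.1 < rng.2 - rng.1 + 1 then (rng.2 - rng.1 + 1, rng) else st)
    (0, PySem.List.pyGetD trange 0 (0, 0))
  st.2

-- ===== PORT B =====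
def useful_range_alt (lst : List Int) (gap : Int) : Int × Int :=
  let s := PySem.List.sorted lst (fun x => x) false
  let start := PySem.List.pyGetD s 0 0
  let st := (PySem.List.pyRange 1 (s.length : Int) 1).foldl
    (fun (st : Int × Int × (Int × Int)) i =>
      if PySem.List.pyGetD s i 0 > gap + 1 + PySem.List.pyGetD s (i - 1) 0 then
        let cur := PySem.List.pyGetD s (i - 1) 0 - st.1 + 1
        if st.2.1 < cur then
          (PySem.List.pyGetD s i 0, cur, (st.1, PySem.List.pyGetD s (i - 1) 0))
        else
          (PySem.List.pyGetD s i 0, st.2.1, st.2.2)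
      else st)
    (start, 0, (start, start))
  let cur := PySem.List.pyGetD s (-1) 0 - st.1 + 1
  if st.2.1 < cur then (st.1, PySem.List.pyGetD s (-1) 0) else st.2.2

-- ===== PRECONDITION & SPEC =====
-- Pre_ excludes only the empty list, on which A raises IndexError (so does B).
def Pre_useful_range (lst : List Int) (gap : Int) : Prop := lst ≠ []
instance (lst : List Int) (gap : Int) : Decidable (Pre_useful_range lst gap) := by unfold Pre_useful_range; infer_instance
def pvWitness_useful_range : List Int × Int := ([1, 2, 3, 9, 20, 21], 0)

def Spec_useful_range (lst : List Int) (gap : Int) (out : Int × Int) : Prop := out = useful_range_alt lst gap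
instance (lst : List Int) (gap : Int) (out : Int × Int) : Decidable (Spec_useful_range lst gap out) := by unfold Spec_useful_range; infer_instance

-- ===== CLAIM (what is proved, stated in full; the proofs are below) =====
def Claim_equal_useful_range : Prop := ∀ (lst : List Int) (gap : Int), Dom_useful_range lst gap → Pre_useful_range lst gap → Spec_useful_range lst gap (useful_range lst gap)

-- ===== LEMMAS AND PROOFS =====

-- the second-phase step of A (first maximal block wins via strict <)
def stepMax (p : Int × (Int × Int)) (rng : Int × Int) : Int × (Int × Int) :=
  if p.1 < rng.2 - rng.1 + 1 then (rng.2 - rng.1 + 1, rng) else p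

-- A's generator step and B's fused step, as named functions (definitionally the port bodies)
def stepA (s : List Int) (gap : Int) (st : Int × List (Int × Int)) (num : Int) : Int × List (Int × Int) :=
  if PySem.List.pyGetD s num 0 > gap + 1 + PySem.List.pyGetD s (num - 1) 0 then
    (num, st.2 ++ [(PySem.List.pyGetD s st.1 0, PySem.List.pyGetD s (num - 1) 0)])
  else st

def stepB (s : List Int) (gap : Int) (st : Int × Int × (Int × Int)) (i : Int) : Int × Int × (Int × Int) :=
  if PySem.List.pyGetD s i 0 > gap + 1 + PySem.List.pyGetD s (i - 1) 0 then
    let cur := PySem.List.pyGetD s (i - 1) 0 - st.1 + 1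
    if st.2.1 < cur then
      (PySem.List.pyGetD s i 0, cur, (st.1, PySem.List.pyGetD s (i - 1) 0))
    else
      (PySem.List.pyGetD s i 0, st.2.1, st.2.2)
  else st

-- A's finishing computation: append the final block, then A's second-phase fold
def finA (s : List Int) (p : Int × List (Int × Int)) : Int × Int :=
  let t := p.2 ++ [(PySem.List.pyGetD s p.1 0, PySem.List.pyGetD s (-1) 0)]
  (t.foldl stepMax (0, PySem.List.pyGetD t 0 (0, 0))).2

-- B's finishing computation: close the last block against the best
def finB (s : List Int) (q : Int × Int × (Int × Int)) : Int × Int :=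
  if q.2.1 < PySem.List.pyGetD s (-1) 0 - q.1 + 1 then (q.1, PySem.List.pyGetD s (-1) 0) else q.2.2

-- invariant: B's (best_len, best) is A's second-phase fold over the blocks emitted so far
def InvBest (s0 : Int) (acc : List (Int × Int)) (blen : Int) (best : Int × Int) : Prop :=
  match acc with
  | [] => blen = 0 ∧ best = (s0, s0)
  | r :: rs => (blen, best) = (r :: rs).foldl stepMax (0, r)

lemma bridgeA (lst : List Int) (gap : Int) :
    useful_range lst gap =
      finA (PySem.List.sorted lst (fun x => x) false)
        ((PySem.List.pyRange 1 ((PySem.List.sorted lst (fun x => x) false).length : Int) 1).foldl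
          (stepA (PySem.List.sorted lst (fun x => x) false) gap) (0, [])) := rfl

lemma bridgeB (lst : List Int) (gap : Int) :
    useful_range_alt lst gap =
      finB (PySem.List.sorted lst (fun x => x) false)
        ((PySem.List.pyRange 1 ((PySem.List.sorted lst (fun x => x) false).length : Int) 1).foldl
          (stepB (PySem.List.sorted lst (fun x => x) false) gap)
          (PySem.List.pyGetD (PySem.List.sorted lst (fun x => x) false) 0 0, 0,
           (PySem.List.pyGetD (PySem.List.sorted lst (fun x => x) false) 0 0,
            PySem.List.pyGetD (PySem.List.sorted lst (fun x => x) false) 0 0))) := rfl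

lemma g_mono (s : List Int) (hs : s.Pairwise (· ≤ ·)) (i j : Int)
    (h0 : 0 ≤ i) (hij : i ≤ j) (hj : j < (s.length : Int)) :
    PySem.List.pyGetD s i 0 ≤ PySem.List.pyGetD s j 0 := by
  rw [PySem.List.pyGetD_eq_getElem s (i := i) 0 h0 (by omega),
      PySem.List.pyGetD_eq_getElem s (i := j) 0 (by omega) hj]
  rcases eq_or_lt_of_le hij with h | h
  · simp [h]
  · exact List.pairwise_iff_getElem.mp hs i.toNat j.toNat (by omega) (by omega) (by omega)

lemma pyGetD_last (s : List Int) (hn : s ≠ []) :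
    PySem.List.pyGetD s (-1) 0 = PySem.List.pyGetD s ((s.length : Int) - 1) 0 := by
  have hl : 1 ≤ s.length := List.length_pos_iff.mpr hn
  rw [PySem.List.pyGetD_neg_ofNat s 1 0 (by omega) hl,
      PySem.List.pyGetD_eq_getElem s (i := (s.length : Int) - 1) 0 (by omega) (by omega)]
  congr 1
  omega

lemma invBest_close (s0 a b : Int) (acc : List (Int × Int)) (blen : Int) (best : Int × Int)
    (h : InvBest s0 acc blen best) (hab : a ≤ b) :
    InvBest s0 (acc ++ [(a, b)]) (stepMax (blen, best) (a, b)).1 (stepMax (blen, best) (a, b)).2 := by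
  match acc with
  | [] =>
    obtain ⟨h1, h2⟩ := h
    subst h1; subst h2
    simp only [List.nil_append, InvBest, List.foldl_cons, List.foldl_nil]
    simp [stepMax, show (0:Int) < b - a + 1 by omega]
  | r :: rs =>
    simp only [InvBest] at h
    rw [List.foldl_cons] at h
    simp only [InvBest, List.cons_append, List.foldl_append, List.foldl_cons, List.foldl_nil, ← h]

lemma main_loop (s : List Int) (gap : Int) (hs : s.Pairwise (· ≤ ·)) (hn : s ≠ [])
    (L : List Int) :
    L.Pairwise (· < ·) →
    ∀ (init : Int) (accA : List (Int × Int)) (blen : Int) (best : Int × Int),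
      0 ≤ init → init < (s.length : Int) →
      (∀ x ∈ L, init < x ∧ x < (s.length : Int)) →
      InvBest (PySem.List.pyGetD s 0 0) accA blen best →
      finA s (L.foldl (stepA s gap) (init, accA)) =
        finB s (L.foldl (stepB s gap) (PySem.List.pyGetD s init 0, blen, best)) := by
  induction L with
  | nil =>
    intro _ init accA blen best h0 hinit _ hInv
    simp only [List.foldl_nil]
    have hle : PySem.List.pyGetD s init 0 ≤ PySem.List.pyGetD s (-1) 0 := by
      rw [pyGetD_last s hn]
      exact g_mono s hs init _ h0 (by omega) (by omega)
    match accA with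
    | [] =>
      obtain ⟨h1, h2⟩ := hInv
      subst h1; subst h2
      simp only [finA, finB, List.nil_append, PySem.List.pyGetD_zero_cons,
        List.foldl_cons, List.foldl_nil, stepMax]
      simp [show (0:Int) < PySem.List.pyGetD s (-1) 0 - PySem.List.pyGetD s init 0 + 1 by omega]
    | r :: rs =>
      simp only [InvBest] at hInv
      rw [List.foldl_cons] at hInv
      simp only [finA, finB, List.cons_append, PySem.List.pyGetD_zero_cons,
        List.foldl_append, List.foldl_cons, List.foldl_nil]
      rw [← hInv]
      simp only [stepMax]
      split <;> rfl
  | cons num L' ih =>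
    intro hL init accA blen best h0 hinit hmem hInv
    rw [List.pairwise_cons] at hL
    obtain ⟨hnum, hn'⟩ := hmem num (List.mem_cons_self)
    simp only [List.foldl_cons]
    by_cases hc : PySem.List.pyGetD s num 0 > gap + 1 + PySem.List.pyGetD s (num - 1) 0
    · have hA : stepA s gap (init, accA) num =
          (num, accA ++ [(PySem.List.pyGetD s init 0, PySem.List.pyGetD s (num - 1) 0)]) := by
        simp [stepA, hc]
      have hB : stepB s gap (PySem.List.pyGetD s init 0, blen, best) num =
          (PySem.List.pyGetD s num 0,
           (stepMax (blen, best) (PySem.List.pyGetD s init 0, PySem.List.pyGetD s (num - 1) 0)).1,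
           (stepMax (blen, best) (PySem.List.pyGetD s init 0, PySem.List.pyGetD s (num - 1) 0)).2) := by
        simp only [stepB, stepMax, if_pos hc]
        split <;> rfl
      rw [hA, hB]
      have hab : PySem.List.pyGetD s init 0 ≤ PySem.List.pyGetD s (num - 1) 0 :=
        g_mono s hs init (num - 1) h0 (by omega) (by omega)
      exact ih hL.2 num _ _ _ (by omega) hn'
        (fun x hx => ⟨hL.1 x hx, (hmem x (List.mem_cons_of_mem _ hx)).2⟩)
        (invBest_close _ _ _ _ _ _ hInv hab)
    · have hA : stepA s gap (init, accA) num = (init, accA) := by simp [stepA, hc]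
      have hB : stepB s gap (PySem.List.pyGetD s init 0, blen, best) num =
          (PySem.List.pyGetD s init 0, blen, best) := by simp [stepB, hc]
      rw [hA, hB]
      exact ih hL.2 init accA blen best h0 hinit
        (fun x hx => ⟨lt_trans hnum (hL.1 x hx), (hmem x (List.mem_cons_of_mem _ hx)).2⟩) hInv

-- ===== VERDICT (by name: the statement is the Claim_ definition above) =====
theorem useful_range_spec : Claim_equal_useful_range := by
  intro lst gap _ hpre
  unfold Spec_useful_range
  rw [bridgeA, bridgeB]
  have hs : (PySem.List.sorted lst (fun x => x) false).Pairwise (· ≤ ·) :=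
    PySem.List.sorted_pairwise lst (fun x => x)
  have hn : PySem.List.sorted lst (fun x => x) false ≠ [] := by
    intro h
    have := (PySem.List.sorted_perm lst (fun x => x) false).length_eq
    rw [h] at this
    exact hpre (List.eq_nil_of_length_eq_zero this.symm)
  exact main_loop _ gap hs hn _ (PySem.List.pairwise_lt_pyRange_one 1 _) 0 [] 0 _
    le_rfl (by exact_mod_cast List.length_pos_iff.mpr hn)
    (fun x hx => by
      have := (PySem.List.mem_pyRange_one).mp hx
      exact ⟨by omega, this.2⟩)
    ⟨rfl, rfl⟩
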